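-- pv_equiv track=rewrite | github.com/markfilliph/business-acquisition-mvp | src/gates/geo_gate.py | normalize_city_name
-- ===== SOURCE A (Python) =====
-- def normalize_city_name(city: str) -> str:
--     """
--     Normalize city name for comparison.
--
--     Args:
--         city: City name to normalize
--
--     Returns:
--         Normalized city name (lowercase, stripped, punctuation removed)
--
--     Example:
--         >>> normalize_city_name("  Hamilton, ON  ")
--         'hamilton'
--         >>> normalize_city_name("Stoney Creek")
--         'stoney creek'
--     """
--     if not city:
--         return ""
--
--     # Convert to lowercase and strip
--     normalized = city.lower().strip()
--
--     # Remove extra whitespace first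
--     normalized = " ".join(normalized.split())
--
--     # Remove common suffixes (ON, Ontario, etc.)
--     suffixes = [", on", ", ontario", " on", " ontario"]
--     for suffix in suffixes:
--         if normalized.endswith(suffix):
--             normalized = normalized[:-len(suffix)].strip()
--             break  # Only remove one suffix
--
--     return normalized
-- ===== SOURCE B (Python) =====
-- def normalize_city_name(city: str) -> str:
--     # Token-list approach: split into words once, drop a trailing
--     # "on"/"ontario" marker word, and peel one trailing comma off the
--     # word before it; no suffix-string scanning.
--     words = city.lower().split()
--     if not words:
--         return ""
--     *head, last = words
--     if head and last in ("on", "ontario"):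
--         prev = head[-1]
--         if prev.endswith(","):
--             prev = prev[:-1]
--         head = head[:-1] + ([prev] if prev else [])
--         return " ".join(head)
--     return " ".join(words)
-- ===== Notes on version B (the rewrite author's own statement) =====
-- stated objective: alternative
-- what changed: B replaces A's collapse-to-string plus ordered suffix-list endswith/slice/strip loop by a single tokenization: split into words once, drop a trailing 'on'/'ontario' word and peel one trailing comma off the preceding word, then join.
import Mathlib
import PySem

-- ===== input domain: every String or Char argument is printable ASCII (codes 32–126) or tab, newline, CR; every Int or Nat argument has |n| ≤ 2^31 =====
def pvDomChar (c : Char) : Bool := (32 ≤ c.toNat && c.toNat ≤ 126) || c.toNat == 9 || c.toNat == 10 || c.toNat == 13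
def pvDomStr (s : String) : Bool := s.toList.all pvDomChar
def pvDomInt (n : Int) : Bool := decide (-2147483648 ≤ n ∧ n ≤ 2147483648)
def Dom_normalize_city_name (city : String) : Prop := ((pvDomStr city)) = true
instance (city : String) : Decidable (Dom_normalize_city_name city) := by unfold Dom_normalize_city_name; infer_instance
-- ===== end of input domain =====

-- B normalizes via one tokenization (split into words, drop a trailing "on"/"ontario"
-- word, peel one trailing comma off the word before it) instead of A's ordered
-- suffix-string loop over the collapsed string; objective: alternative decomposition.

-- ===== PORT A =====
def pvSuffixesA : List String := [", on", ", ontario", " on", " ontario"]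

-- the for-loop with break: try each suffix in order, apply the first that matches
def pvSuffixTrimA (n : String) : List String → String
  | [] => n
  | suf :: rest =>
    if PySem.Str.endswith n suf then
      PySem.Str.strip (PySem.Str.slice n none (some (-(PySem.Str.len suf : Int))))
    else pvSuffixTrimA n rest

def normalize_city_name (city : String) : String :=
  if city == "" then ""
  else
    let normalized := PySem.Str.strip (PySem.Str.lower city)
    let normalized := PySem.Str.join " " (PySem.Str.split₀ normalized)
    pvSuffixTrimA normalized pvSuffixesA

-- ===== PORT B =====
def normalize_city_name_alt (city : String) : String :=
  let words := PySem.Str.split₀ (PySem.Str.lower city)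
  -- `if not words: return ""` together with `*head, last = words`
  match words.getLast?, words.dropLast with
  | some last, q :: hs =>
    if last == "on" || last == "ontario" then
      let head := q :: hs
      let prev0 := head.getLast (by simp)
      let prev := if PySem.Str.endswith prev0 "," then PySem.Str.slice prev0 none (some (-1)) else prev0
      PySem.Str.join " " (head.dropLast ++ (if prev == "" then [] else [prev]))
    else PySem.Str.join " " words
  | _, _ => PySem.Str.join " " words

-- ===== PRECONDITION & SPEC =====
def Spec_normalize_city_name (city : String) (out : String) : Prop := out = normalize_city_name_alt city
instance (city : String) (out : String) : Decidable (Spec_normalize_city_name city out) := by unfold Spec_normalize_city_name; infer_instance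

-- ===== CLAIM (what is proved, stated in full; the proofs are below) =====
def Claim_equal_normalize_city_name : Prop := ∀ (city : String), Dom_normalize_city_name city → Spec_normalize_city_name city (normalize_city_name city)

-- ===== LEMMAS AND PROOFS =====

-- a word from str.split(): nonempty and whitespace-free
def pvNoSp (w : List Char) : Prop := ∀ c ∈ w, PySem.Chars.isspace c = false
def pvGood (ws : List (List Char)) : Prop := ∀ w ∈ ws, w ≠ [] ∧ pvNoSp w
def pvJ (ws : List (List Char)) : List Char := PySem.Chars.join [' '] ws

theorem pv_go_spaces (u : List Char) (hu : ∀ c ∈ u, PySem.Chars.isspace c = true)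
    (cur : List Char) (acc : List (List Char)) :
    PySem.Chars.split₀.go u cur acc = PySem.Chars.split₀.go [] cur acc := by
  induction u generalizing cur acc with
  | nil => rfl
  | cons c u ih =>
    have hc : PySem.Chars.isspace c = true := hu c (by simp)
    have hu' : ∀ d ∈ u, PySem.Chars.isspace d = true := fun d hd => hu d (List.mem_cons_of_mem _ hd)
    cases cur with
    | nil =>
      rw [show PySem.Chars.split₀.go (c :: u) [] acc = PySem.Chars.split₀.go u [] acc from by
        simp [PySem.Chars.split₀.go, hc]]
      exact ih hu' [] acc
    | cons d ds =>
      rw [show PySem.Chars.split₀.go (c :: u) (d :: ds) acc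
            = PySem.Chars.split₀.go u [] ((d :: ds).reverse :: acc) from by
        simp [PySem.Chars.split₀.go, hc]]
      rw [ih hu' [] _]
      simp [PySem.Chars.split₀.go]

theorem pv_go_append_spaces (t u : List Char) (hu : ∀ c ∈ u, PySem.Chars.isspace c = true)
    (cur : List Char) (acc : List (List Char)) :
    PySem.Chars.split₀.go (t ++ u) cur acc = PySem.Chars.split₀.go t cur acc := by
  induction t generalizing cur acc with
  | nil => simpa using pv_go_spaces u hu cur acc
  | cons c t ih =>
    by_cases hc : PySem.Chars.isspace c = true
    · cases cur with
      | nil =>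
        rw [show PySem.Chars.split₀.go ((c :: t) ++ u) [] acc
              = PySem.Chars.split₀.go (t ++ u) [] acc from by simp [PySem.Chars.split₀.go, hc],
            show PySem.Chars.split₀.go (c :: t) [] acc
              = PySem.Chars.split₀.go t [] acc from by simp [PySem.Chars.split₀.go, hc]]
        exact ih [] acc
      | cons d ds =>
        rw [show PySem.Chars.split₀.go ((c :: t) ++ u) (d :: ds) acc
              = PySem.Chars.split₀.go (t ++ u) [] ((d :: ds).reverse :: acc) from by
            simp [PySem.Chars.split₀.go, hc],
            show PySem.Chars.split₀.go (c :: t) (d :: ds) acc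
              = PySem.Chars.split₀.go t [] ((d :: ds).reverse :: acc) from by
            simp [PySem.Chars.split₀.go, hc]]
        exact ih [] _
    · rw [show PySem.Chars.split₀.go ((c :: t) ++ u) cur acc
            = PySem.Chars.split₀.go (t ++ u) (c :: cur) acc from by simp [PySem.Chars.split₀.go, hc],
          show PySem.Chars.split₀.go (c :: t) cur acc
            = PySem.Chars.split₀.go t (c :: cur) acc from by simp [PySem.Chars.split₀.go, hc]]
      exact ih _ _

theorem pv_split₀_lstrip (s : List Char) :
    PySem.Chars.split₀ (PySem.Chars.lstrip s) = PySem.Chars.split₀ s := by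
  induction s with
  | nil => rfl
  | cons c s ih =>
    by_cases hc : PySem.Chars.isspace c = true
    · rw [show PySem.Chars.lstrip (c :: s) = PySem.Chars.lstrip s from by
        simp [PySem.Chars.lstrip, hc]]
      rw [ih]
      show PySem.Chars.split₀ s = PySem.Chars.split₀ (c :: s)
      unfold PySem.Chars.split₀
      rw [show PySem.Chars.split₀.go (c :: s) [] [] = PySem.Chars.split₀.go s [] [] from by
        simp [PySem.Chars.split₀.go, hc]]
    · rw [show PySem.Chars.lstrip (c :: s) = c :: s from by
        simp [PySem.Chars.lstrip, List.dropWhile_cons_of_neg hc]]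

theorem pv_split₀_rstrip (s : List Char) :
    PySem.Chars.split₀ (PySem.Chars.rstrip s) = PySem.Chars.split₀ s := by
  have hdecomp : s = PySem.Chars.rstrip s ++ (List.takeWhile PySem.Chars.isspace s.reverse).reverse := by
    unfold PySem.Chars.rstrip
    conv_lhs => rw [← List.reverse_reverse s,
      ← List.takeWhile_append_dropWhile (p := PySem.Chars.isspace) (l := s.reverse)]
    rw [List.reverse_append]
  conv_rhs => rw [hdecomp]
  unfold PySem.Chars.split₀
  exact (pv_go_append_spaces _ _
    (fun c hc => List.mem_takeWhile_imp (List.mem_reverse.mp hc)) [] []).symm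

theorem pv_split₀_strip (s : List Char) :
    PySem.Chars.split₀ (PySem.Chars.strip s) = PySem.Chars.split₀ s := by
  rw [show PySem.Chars.strip s = PySem.Chars.rstrip (PySem.Chars.lstrip s) from rfl,
    pv_split₀_rstrip, pv_split₀_lstrip]

theorem pv_go_good (s : List Char) :
    ∀ (cur : List Char) (acc : List (List Char)), pvNoSp cur →
      (∀ w ∈ acc, w ≠ [] ∧ pvNoSp w) → pvGood (PySem.Chars.split₀.go s cur acc) := by
  induction s with
  | nil =>
    intro cur acc hcur hacc
    cases cur with
    | nil =>
      rw [show PySem.Chars.split₀.go [] [] acc = acc.reverse from by simp [PySem.Chars.split₀.go]]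
      intro w hw; exact hacc w (List.mem_reverse.mp hw)
    | cons d ds =>
      rw [show PySem.Chars.split₀.go [] (d :: ds) acc = ((d :: ds).reverse :: acc).reverse from by
        simp [PySem.Chars.split₀.go]]
      intro w hw
      rcases List.mem_cons.mp (List.mem_reverse.mp hw) with rfl | hw'
      · exact ⟨by simp, fun c hc => hcur c (List.mem_reverse.mp hc)⟩
      · exact hacc w hw'
  | cons c s ih =>
    intro cur acc hcur hacc
    by_cases hc : PySem.Chars.isspace c = true
    · cases cur with
      | nil =>
        rw [show PySem.Chars.split₀.go (c :: s) [] acc = PySem.Chars.split₀.go s [] acc from by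
          simp [PySem.Chars.split₀.go, hc]]
        exact ih [] acc (by intro d hd; simp at hd) hacc
      | cons d ds =>
        rw [show PySem.Chars.split₀.go (c :: s) (d :: ds) acc
              = PySem.Chars.split₀.go s [] ((d :: ds).reverse :: acc) from by
          simp [PySem.Chars.split₀.go, hc]]
        refine ih [] _ (by intro e he; simp at he) ?_
        intro w hw
        rcases List.mem_cons.mp hw with rfl | hw'
        · exact ⟨by simp, fun e he => hcur e (List.mem_reverse.mp he)⟩
        · exact hacc w hw'
    · have hc' : PySem.Chars.isspace c = false := by simpa using hc
      rw [show PySem.Chars.split₀.go (c :: s) cur acc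
            = PySem.Chars.split₀.go s (c :: cur) acc from by simp [PySem.Chars.split₀.go, hc']]
      refine ih (c :: cur) acc ?_ hacc
      intro e he
      rcases List.mem_cons.mp he with rfl | he'
      · exact hc'
      · exact hcur e he'

theorem pv_good_split₀ (s : List Char) : pvGood (PySem.Chars.split₀ s) :=
  pv_go_good s [] [] (by intro c hc; simp at hc) (by intro w hw; simp at hw)

theorem pvJ_cons (a : List Char) (rest : List (List Char)) (h : rest ≠ []) :
    pvJ (a :: rest) = a ++ ' ' :: pvJ rest := by
  cases rest with
  | nil => cases h rfl
  | cons b rs =>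
    show PySem.Chars.join [' '] (a :: b :: rs) = _
    rw [PySem.Chars.join_cons_cons]
    simp [pvJ, List.append_assoc]

theorem pvJ_snoc (r : List (List Char)) (w : List Char) (hr : r ≠ []) :
    pvJ (r ++ [w]) = pvJ r ++ ' ' :: w := by
  induction r with
  | nil => cases hr rfl
  | cons q r ih =>
    cases r with
    | nil =>
      show pvJ [q, w] = pvJ [q] ++ ' ' :: w
      simp [pvJ, PySem.Chars.join_singleton, PySem.Chars.join_cons_cons]
    | cons q2 r2 =>
      rw [List.cons_append, pvJ_cons q ((q2 :: r2) ++ [w]) (by simp),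
          pvJ_cons q (q2 :: r2) (by simp), ih (by simp), List.append_assoc]
      rfl

theorem pv_singleton_prefix {c : Char} {l : List Char} : [c] <+: l ↔ l.head? = some c := by
  cases l with
  | nil => simp
  | cons d ds => simp [List.cons_prefix_cons, eq_comm]

theorem pv_singleton_suffix {c : Char} {l : List Char} : [c] <:+ l ↔ l.getLast? = some c := by
  rw [← List.reverse_prefix]
  rw [show ([c] : List Char).reverse = [c] from by simp]
  rw [pv_singleton_prefix, List.head?_reverse]

theorem pvJ_head? (w : List Char) (rest : List (List Char)) (hw : w ≠ []) :
    (pvJ (w :: rest)).head? = w.head? := by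
  cases rest with
  | nil => simp [pvJ, PySem.Chars.join_singleton]
  | cons b rs =>
    rw [pvJ_cons w (b :: rs) (by simp)]
    exact List.head?_append_of_ne_nil _ hw

theorem pvJ_ne_nil (ws : List (List Char)) (h : pvGood ws) (hne : ws ≠ []) : pvJ ws ≠ [] := by
  cases ws with
  | nil => cases hne rfl
  | cons w rest =>
    intro hcontra
    have hw : w ≠ [] := (h w (by simp)).1
    have := pvJ_head? w rest hw
    rw [hcontra] at this
    cases hww : w with
    | nil => exact hw hww
    | cons c cs => rw [hww] at this; simp at this

theorem pvJ_getLast? (r : List (List Char)) (p : List Char) (hp : p ≠ []) :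
    (pvJ (r ++ [p])).getLast? = p.getLast? := by
  cases r with
  | nil => simp [pvJ, PySem.Chars.join_singleton]
  | cons q rs =>
    rw [pvJ_snoc (q :: rs) p (by simp)]
    have h1 : (' ' :: p).getLast? = p.getLast? := by
      rw [show (' ' :: p) = [' '] ++ p from rfl, List.getLast?_append,
        Option.or_of_isSome (List.getLast?_isSome.mpr hp)]
    rw [List.getLast?_append, h1, Option.or_of_isSome (List.getLast?_isSome.mpr hp)]

theorem pv_headJ (ws : List (List Char)) (h : pvGood ws) :
    ∀ c, (pvJ ws).head? = some c → PySem.Chars.isspace c = false := by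
  intro c hc
  cases ws with
  | nil => simp [pvJ, PySem.Chars.join_nil] at hc
  | cons w rest =>
    rw [pvJ_head? w rest (h w (by simp)).1] at hc
    exact (h w (by simp)).2 c (List.mem_of_mem_head? (by simp [hc]))

theorem pv_lastJ (ws : List (List Char)) (h : pvGood ws) :
    ∀ c, (pvJ ws).getLast? = some c → PySem.Chars.isspace c = false := by
  intro c hc
  rcases List.eq_nil_or_concat ws with rfl | ⟨r, p, hcat⟩
  · simp [pvJ, PySem.Chars.join_nil] at hc
  · rw [List.concat_eq_append] at hcat
    subst hcat
    rw [pvJ_getLast? r p (h p (by simp)).1] at hc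
    exact (h p (by simp)).2 c (List.mem_of_mem_getLast? (by simp [hc]))

theorem pv_lstrip_eq (l : List Char)
    (h : ∀ c, l.head? = some c → PySem.Chars.isspace c = false) :
    PySem.Chars.lstrip l = l := by
  cases l with
  | nil => rfl
  | cons c cs =>
    show List.dropWhile _ (c :: cs) = c :: cs
    exact List.dropWhile_cons_of_neg (by simp [h c rfl])

theorem pv_rstrip_eq (l : List Char)
    (h : ∀ c, l.getLast? = some c → PySem.Chars.isspace c = false) :
    PySem.Chars.rstrip l = l := by
  show (List.dropWhile _ l.reverse).reverse = l
  cases hrev : l.reverse with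
  | nil =>
    have : l = [] := by simpa using congrArg List.reverse hrev
    simp [this]
  | cons c cs =>
    rw [List.dropWhile_cons_of_neg (by simp [h c (by rw [← List.head?_reverse, hrev]; rfl)]),
      ← hrev, List.reverse_reverse]

theorem pv_strip_eq (l : List Char)
    (h1 : ∀ c, l.head? = some c → PySem.Chars.isspace c = false)
    (h2 : ∀ c, l.getLast? = some c → PySem.Chars.isspace c = false) :
    PySem.Chars.strip l = l := by
  show PySem.Chars.rstrip (PySem.Chars.lstrip l) = l
  rw [pv_lstrip_eq l h1, pv_rstrip_eq l h2]

theorem pv_strip_J (ws : List (List Char)) (h : pvGood ws) :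
    PySem.Chars.strip (pvJ ws) = pvJ ws :=
  pv_strip_eq _ (pv_headJ ws h) (pv_lastJ ws h)

theorem pv_rstrip_append_space (l : List Char) :
    PySem.Chars.rstrip (l ++ [' ']) = PySem.Chars.rstrip l := by
  show (List.dropWhile _ (l ++ [' ']).reverse).reverse = _
  rw [List.reverse_append, show ([' '] : List Char).reverse = [' '] from by simp]
  rw [show ([' '] ++ l.reverse : List Char) = ' ' :: l.reverse from rfl]
  rw [List.dropWhile_cons_of_pos (by decide)]
  rfl

theorem pv_strip_append_space (ws : List (List Char)) (h : pvGood ws) :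
    PySem.Chars.strip (pvJ ws ++ [' ']) = pvJ ws := by
  cases ws with
  | nil => decide
  | cons w rest =>
    have h1 : PySem.Chars.lstrip (pvJ (w :: rest) ++ [' ']) = pvJ (w :: rest) ++ [' '] := by
      apply pv_lstrip_eq
      intro c hc
      rw [List.head?_append_of_ne_nil _ (pvJ_ne_nil _ h (by simp))] at hc
      exact pv_headJ _ h c hc
    show PySem.Chars.rstrip (PySem.Chars.lstrip _) = _
    rw [h1, pv_rstrip_append_space, pv_rstrip_eq _ (pv_lastJ _ h)]

theorem pv_G1 (r : List (List Char)) (w t : List Char) (hg : pvGood (r ++ [w])) (ht : pvNoSp t) :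
    ((' ' :: t) <:+ pvJ (r ++ [w])) ↔ (r ≠ [] ∧ t = w) := by
  have hw : w ≠ [] := (hg w (by simp)).1
  by_cases hr : r = []
  · subst hr
    rw [show pvJ ([] ++ [w]) = w from by simp [pvJ, PySem.Chars.join_singleton]]
    constructor
    · intro h
      exact absurd ((hg w (by simp)).2 ' ' (h.subset (by simp))) (by decide)
    · rintro ⟨h, -⟩; exact absurd rfl h
  · rw [pvJ_snoc r w hr]
    constructor
    · intro h
      have hw' : (' ' :: w) <:+ pvJ r ++ ' ' :: w := List.suffix_append _ _
      refine ⟨hr, ?_⟩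
      rcases lt_trichotomy t.length w.length with hlt | heq | hgt
      · have h2 : (' ' :: t) <:+ (' ' :: w) :=
          List.suffix_of_suffix_length_le h hw' (by simp; omega)
        rcases List.suffix_cons_iff.mp h2 with h3 | h3
        · have := congrArg List.length h3; simp at this; omega
        · exact absurd ((hg w (by simp)).2 ' ' (h3.subset (by simp))) (by decide)
      · have h2 : (' ' :: t) <:+ (' ' :: w) :=
          List.suffix_of_suffix_length_le h hw' (by simp [heq])
        have h3 := List.suffix_iff_eq_drop.mp h2
        simp [heq] at h3
        exact h3
      · have h2 : (' ' :: w) <:+ (' ' :: t) :=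
          List.suffix_of_suffix_length_le hw' h (by simp; omega)
        rcases List.suffix_cons_iff.mp h2 with h3 | h3
        · have := congrArg List.length h3; simp at this; omega
        · exact absurd (ht ' ' (h3.subset (by simp))) (by decide)
    · rintro ⟨-, rfl⟩; exact List.suffix_append _ _

theorem pv_G2 (r : List (List Char)) (w t : List Char) (hg : pvGood (r ++ [w])) (ht : pvNoSp t) :
    ((',' :: ' ' :: t) <:+ pvJ (r ++ [w])) ↔
      (r ≠ [] ∧ t = w ∧ (pvJ r).getLast? = some ',') := by
  constructor
  · intro h
    have h1 : (' ' :: t) <:+ pvJ (r ++ [w]) := (List.suffix_cons ',' _).trans h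
    obtain ⟨hr, rfl⟩ := (pv_G1 r w t hg ht).mp h1
    refine ⟨hr, rfl, ?_⟩
    rw [pvJ_snoc r _ hr] at h
    rw [← List.reverse_prefix, List.reverse_append,
      show (',' :: ' ' :: t).reverse = (' ' :: t).reverse ++ [','] from List.reverse_cons ..] at h
    have h2 : [','] <+: (pvJ r).reverse := (List.prefix_append_right_inj _).mp h
    have h3 : [','] <:+ pvJ r := by
      rw [← List.reverse_prefix]; simpa using h2
    exact pv_singleton_suffix.mp h3
  · rintro ⟨hr, rfl, hcomma⟩
    obtain ⟨u, hu⟩ : [','] <:+ pvJ r := pv_singleton_suffix.mpr hcomma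
    rw [pvJ_snoc r _ hr, ← hu, List.append_assoc]
    exact List.suffix_append u _

theorem pv_space_case (R : List (List Char)) (W : List Char) (k : Nat) (hk : k = W.length + 1)
    (hR : R ≠ []) (hg : pvGood (R ++ [W])) :
    PySem.Chars.strip
        (List.take ((pvJ (R ++ [W])).length - k) (pvJ (R ++ [W]))) = pvJ R := by
  subst hk
  have hgR : pvGood R := fun w hw => hg w (by simp [hw])
  rw [pvJ_snoc R W hR]
  have hlen : (pvJ R ++ ' ' :: W).length - (W.length + 1) = (pvJ R).length := by
    simp [List.length_append]
  rw [hlen, List.take_left]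
  exact pv_strip_J R hgR

theorem pv_comma_case (R' : List (List Char)) (P W : List Char) (k : Nat) (hk : k = W.length + 2)
    (hg : pvGood ((R' ++ [P]) ++ [W])) (hP : P.getLast? = some ',') :
    PySem.Chars.strip
        (List.take ((pvJ ((R' ++ [P]) ++ [W])).length - k) (pvJ ((R' ++ [P]) ++ [W])))
      = pvJ (R' ++ (if P.dropLast = [] then [] else [P.dropLast])) := by
  subst hk
  have hPne : P ≠ [] := (hg P (by simp)).1
  have hPlen : 1 ≤ P.length := by cases P with | nil => cases hPne rfl | cons a l => simp
  have hgR : pvGood (R' ++ [P]) := by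
    intro w hw; exact hg w (by simp at hw ⊢; tauto)
  have hgR' : pvGood R' := fun w hw => hgR w (by simp [hw])
  rw [pvJ_snoc _ W (by simp)]
  have hJlen : 1 ≤ (pvJ (R' ++ [P])).length := by
    have := pvJ_ne_nil (R' ++ [P]) hgR (by simp)
    cases hc : pvJ (R' ++ [P]) with
    | nil => cases this hc
    | cons a l => simp
  have hlen : (pvJ (R' ++ [P]) ++ ' ' :: W).length - (W.length + 2)
      = (pvJ (R' ++ [P])).length - 1 := by
    simp [List.length_append]; omega
  rw [hlen, List.take_append_of_le_length (by omega), ← List.dropLast_eq_take]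
  by_cases hR'nil : R' = []
  · subst hR'nil
    rw [show pvJ ([] ++ [P]) = P from by simp [pvJ, PySem.Chars.join_singleton]]
    by_cases hPd : P.dropLast = []
    · rw [if_pos hPd, hPd]
      simp [pvJ, PySem.Chars.join_nil, PySem.Chars.strip, PySem.Chars.lstrip, PySem.Chars.rstrip]
    · rw [if_neg hPd,
        show pvJ ([] ++ [P.dropLast]) = P.dropLast from by simp [pvJ, PySem.Chars.join_singleton]]
      apply pv_strip_eq
      · intro c hc
        exact (hg P (by simp)).2 c (List.dropLast_subset _ (List.mem_of_mem_head? (by simp [hc])))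
      · intro c hc
        exact (hg P (by simp)).2 c (List.dropLast_subset _ (List.mem_of_mem_getLast? (by simp [hc])))
  · rw [pvJ_snoc R' P hR'nil,
      List.dropLast_append_of_ne_nil (by simp : (' ' :: P) ≠ []),
      List.dropLast_cons_of_ne_nil hPne]
    by_cases hPd : P.dropLast = []
    · rw [if_pos hPd, hPd, List.append_nil]
      exact pv_strip_append_space R' hgR'
    · rw [if_neg hPd, ← pvJ_snoc R' _ hR'nil]
      apply pv_strip_J
      intro w hw
      rcases List.mem_append.mp hw with hw' | hw'
      · exact hgR' w hw'
      · have : w = P.dropLast := by simpa using hw'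
        subst this
        exact ⟨hPd, fun c hc => (hg P (by simp)).2 c (List.dropLast_subset _ hc)⟩

-- proof-side view of port B's match, used to reduce it by cases on the word list
def pvAltWords (words : List String) : String :=
  match words.getLast?, words.dropLast with
  | some last, q :: hs =>
    if last == "on" || last == "ontario" then
      let head := q :: hs
      let prev0 := head.getLast (by simp)
      let prev := if PySem.Str.endswith prev0 "," then PySem.Str.slice prev0 none (some (-1)) else prev0
      PySem.Str.join " " (head.dropLast ++ (if prev == "" then [] else [prev]))
    else PySem.Str.join " " words
  | _, _ => PySem.Str.join " " words

theorem pv_alt_eq (city : String) :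
    normalize_city_name_alt city = pvAltWords (PySem.Str.split₀ (PySem.Str.lower city)) := rfl

theorem pv_a_eq (city : String) :
    normalize_city_name city =
      if city == "" then ""
      else pvSuffixTrimA
        (PySem.Str.join " " (PySem.Str.split₀ (PySem.Str.strip (PySem.Str.lower city)))) pvSuffixesA := rfl

theorem pv_alt_single (last : String) : pvAltWords [last] = PySem.Str.join " " [last] := rfl

theorem pv_alt_step (q last : String) (hs : List String) :
    pvAltWords ((q :: hs) ++ [last]) =
      (if last == "on" || last == "ontario" then
        let head := q :: hs
        let prev0 := head.getLast (by simp)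
        let prev := if PySem.Str.endswith prev0 "," then PySem.Str.slice prev0 none (some (-1)) else prev0
        PySem.Str.join " " (head.dropLast ++ (if prev == "" then [] else [prev]))
      else PySem.Str.join " " ((q :: hs) ++ [last])) := by
  unfold pvAltWords
  rw [List.getLast?_concat, List.dropLast_concat]

theorem pv_toList_join (parts : List String) :
    (PySem.Str.join " " parts).toList = pvJ (List.map String.toList parts) := by
  rw [PySem.Str.toList_join, show (" " : String).toList = [' '] from by decide]; rfl

theorem pv_nosp_of_all (l : List Char) (h : l.all (fun c => !PySem.Chars.isspace c) = true) :
    pvNoSp l := by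
  intro c hc
  have := List.all_eq_true.mp h c hc
  simpa using this

theorem pv_nosp_on : pvNoSp ['o','n'] := pv_nosp_of_all _ (by decide)

theorem pv_nosp_ontario : pvNoSp ['o','n','t','a','r','i','o'] := pv_nosp_of_all _ (by decide)

-- ===== VERDICT (by name: the statement is the Claim_ definition above) =====
theorem normalize_city_name_spec : Claim_equal_normalize_city_name := by
  intro city _
  show normalize_city_name city = normalize_city_name_alt city
  rw [pv_a_eq, pv_alt_eq]
  by_cases hcity : city = ""
  · subst hcity; decide
  · rw [if_neg (by simp [hcity])]
    have hsplit : PySem.Str.split₀ (PySem.Str.strip (PySem.Str.lower city))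
        = PySem.Str.split₀ (PySem.Str.lower city) := by
      apply List.map_injective_iff.mpr (fun a b h => String.toList_inj.mp h)
      rw [PySem.Str.split₀_map_toList, PySem.Str.split₀_map_toList, PySem.Str.toList_strip,
        pv_split₀_strip]
    rw [hsplit]
    rcases List.eq_nil_or_concat (PySem.Str.split₀ (PySem.Str.lower city)) with hw0 | ⟨r, last, hcat⟩
    · rw [hw0]; decide
    · rw [List.concat_eq_append] at hcat
      have hgood : pvGood (List.map String.toList (r ++ [last])) := by
        have h0 := pv_good_split₀ (PySem.Chars.lower city.toList)
        rw [← PySem.Str.toList_lower, ← PySem.Str.split₀_map_toList, hcat] at h0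
        exact h0
      rw [hcat]
      set n := PySem.Str.join " " (r ++ [last]) with hndef
      have hnl : n.toList = pvJ (List.map String.toList (r ++ [last])) := pv_toList_join _
      cases r with
      | nil =>
        -- no word before the last one: no suffix can match
        have key : ∀ (t : List Char), pvNoSp t → ¬ ((' ' :: t) <:+ n.toList) := by
          intro t ht hsuf
          rw [hnl] at hsuf
          have h1 := (pv_G1 [] last.toList t (by simpa using hgood) ht).mp (by simpa using hsuf)
          exact h1.1 rfl
        have keyc : ∀ (t : List Char), pvNoSp t → ¬ ((',' :: ' ' :: t) <:+ n.toList) := by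
          intro t ht hsuf
          exact key t ht ((List.suffix_cons ',' _).trans hsuf)
        have f1 : PySem.Chars.endswith n.toList [',', ' ', 'o', 'n'] = false := by
          rw [← Bool.not_eq_true, PySem.Chars.endswith_iff]
          exact keyc ['o','n'] pv_nosp_on
        have f2 : PySem.Chars.endswith n.toList [',', ' ', 'o', 'n', 't', 'a', 'r', 'i', 'o'] = false := by
          rw [← Bool.not_eq_true, PySem.Chars.endswith_iff]
          exact keyc ['o','n','t','a','r','i','o'] pv_nosp_ontario
        have f3 : PySem.Chars.endswith n.toList [' ', 'o', 'n'] = false := by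
          rw [← Bool.not_eq_true, PySem.Chars.endswith_iff]
          exact key ['o','n'] pv_nosp_on
        have f4 : PySem.Chars.endswith n.toList [' ', 'o', 'n', 't', 'a', 'r', 'i', 'o'] = false := by
          rw [← Bool.not_eq_true, PySem.Chars.endswith_iff]
          exact key ['o','n','t','a','r','i','o'] pv_nosp_ontario
        rw [show pvSuffixTrimA n pvSuffixesA = n from by
          simp [pvSuffixTrimA, pvSuffixesA, f1, f2, f3, f4]]
        rw [show ([] : List String) ++ [last] = [last] from by simp, pv_alt_single, hndef]
        simp
      | cons q hs =>
        obtain ⟨r2, p, hqp⟩ := (List.eq_nil_or_concat (q :: hs)).resolve_left (by simp)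
        rw [List.concat_eq_append] at hqp
        have hmap : List.map String.toList ((q :: hs) ++ [last])
            = List.map String.toList (q :: hs) ++ [last.toList] := by simp
        have hgood' : pvGood (List.map String.toList (q :: hs) ++ [last.toList]) := by
          rw [← hmap]; exact hgood
        have hmap2 : List.map String.toList (q :: hs)
            = List.map String.toList r2 ++ [p.toList] := by rw [hqp]; simp
        have hRne : List.map String.toList (q :: hs) ≠ [] := by simp
        have hpmem : String.toList p ∈ List.map String.toList ((q :: hs) ++ [last]) := by
          apply List.mem_map_of_mem; rw [hqp]; simp
        have hpne : p.toList ≠ [] := (hgood _ hpmem).1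
        have hlast2 : ∀ (h : (q :: hs) ≠ []), (q :: hs).getLast h = p := by
          intro h
          have h1 : (q :: hs).getLast? = some p := by rw [hqp]; exact List.getLast?_concat
          have h2 : (q :: hs).getLast? = some ((q :: hs).getLast h) :=
            List.getLast?_eq_some_getLast h
          exact (Option.some.inj (h1.symm.trans h2)).symm
        have hdrop : (q :: hs).dropLast = r2 := by rw [hqp]; exact List.dropLast_concat
        have hcommaJ : (pvJ (List.map String.toList (q :: hs))).getLast? = p.toList.getLast? := by
          rw [hmap2]; exact pvJ_getLast? _ _ hpne
        have hsufG1 : ∀ (t : List Char), pvNoSp t →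
            ((' ' :: t) <:+ n.toList ↔ t = last.toList) := by
          intro t ht
          rw [hnl, hmap, pv_G1 _ _ _ hgood' ht]
          simp
        have hsufG2 : ∀ (t : List Char), pvNoSp t →
            ((',' :: ' ' :: t) <:+ n.toList ↔ (t = last.toList ∧ p.toList.getLast? = some ',')) := by
          intro t ht
          rw [hnl, hmap, pv_G2 _ _ _ hgood' ht, hcommaJ]
          simp
        have hprevl : (PySem.Str.slice p none (some (-1))).toList = p.toList.dropLast := by
          rw [PySem.Str.toList_slice, PySem.Chars.slice_eq_listSlice, PySem.List.slice_to_neg_one]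
        by_cases hon : last = "on"
        · subst hon
          by_cases hc : p.toList.getLast? = some ','
          · -- ", on" matches
            have f1 : PySem.Chars.endswith n.toList [',', ' ', 'o', 'n'] = true := by
              rw [PySem.Chars.endswith_iff]
              exact (hsufG2 ['o','n'] pv_nosp_on).mpr ⟨by decide, hc⟩
            rw [show pvSuffixTrimA n pvSuffixesA
                = PySem.Str.strip (PySem.Str.slice n none (some (-4))) from by
              simp [pvSuffixTrimA, pvSuffixesA, f1]]
            refine String.toList_inj.mp ?_
            rw [PySem.Str.toList_strip, PySem.Str.toList_slice, PySem.Chars.slice_eq_listSlice,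
              PySem.List.slice_to_neg_ofNat _ 4 (by omega)]
            have hnl2 : n.toList
                = pvJ ((List.map String.toList r2 ++ [p.toList]) ++ [("on" : String).toList]) := by
              rw [hnl, hmap, hmap2]
            have hgood2 : pvGood ((List.map String.toList r2 ++ [p.toList]) ++ [("on" : String).toList]) := by
              rw [← hmap2]; exact hgood'
            rw [hnl2, pv_comma_case _ _ _ 4 (by decide) hgood2 hc]
            -- reduce the B side
            have g1 : PySem.Str.endswith p "," = true := by
              rw [PySem.Str.endswith_eq, PySem.Chars.endswith_iff,
                show ("," : String).toList = [','] from by decide]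
              exact pv_singleton_suffix.mpr hc
            rw [pv_alt_step,
              if_pos (show (("on" : String) == "on" || ("on" : String) == "ontario") = true from by decide)]
            simp only []
            rw [hlast2, if_pos g1, hdrop]
            by_cases hPd : p.toList.dropLast = []
            · have hb : (PySem.Str.slice p none (some (-1)) == "") = true := by
                rw [beq_iff_eq]
                exact String.toList_inj.mp (by rw [hprevl, hPd]; decide)
              rw [if_pos hPd, if_pos hb, List.append_nil, pv_toList_join]
              simp
            · have hb : ¬ ((PySem.Str.slice p none (some (-1)) == "") = true) := by
                rw [beq_iff_eq]
                intro hcontra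
                exact hPd (by rw [← hprevl, hcontra]; decide)
              rw [if_neg hPd, if_neg hb, pv_toList_join]
              simp [hprevl]
          · -- " on" matches (third suffix)
            have f1 : PySem.Chars.endswith n.toList [',', ' ', 'o', 'n'] = false := by
              rw [← Bool.not_eq_true, PySem.Chars.endswith_iff, hsufG2 ['o','n'] pv_nosp_on]
              exact fun h => hc h.2
            have f2 : PySem.Chars.endswith n.toList [',', ' ', 'o', 'n', 't', 'a', 'r', 'i', 'o'] = false := by
              rw [← Bool.not_eq_true, PySem.Chars.endswith_iff,
                hsufG2 ['o','n','t','a','r','i','o'] pv_nosp_ontario]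
              exact fun h => absurd h.1 (by decide)
            have f3 : PySem.Chars.endswith n.toList [' ', 'o', 'n'] = true := by
              rw [PySem.Chars.endswith_iff, hsufG1 ['o','n'] pv_nosp_on]
              decide
            rw [show pvSuffixTrimA n pvSuffixesA
                = PySem.Str.strip (PySem.Str.slice n none (some (-3))) from by
              simp [pvSuffixTrimA, pvSuffixesA, f1, f2, f3]]
            refine String.toList_inj.mp ?_
            rw [PySem.Str.toList_strip, PySem.Str.toList_slice, PySem.Chars.slice_eq_listSlice,
              PySem.List.slice_to_neg_ofNat _ 3 (by omega)]
            have hnl2 : n.toList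
                = pvJ (List.map String.toList (q :: hs) ++ [("on" : String).toList]) := by
              rw [hnl, hmap]
            rw [hnl2, pv_space_case _ _ 3 (by decide) hRne hgood']
            -- B side: comma check fails, word kept
            have g1 : ¬ (PySem.Str.endswith p "," = true) := by
              rw [PySem.Str.endswith_eq, PySem.Chars.endswith_iff,
                show ("," : String).toList = [','] from by decide, pv_singleton_suffix]
              exact hc
            have hb : ¬ ((p == "") = true) := by
              rw [beq_iff_eq]
              intro hcontra
              exact hpne (by rw [hcontra]; decide)
            rw [pv_alt_step,
              if_pos (show (("on" : String) == "on" || ("on" : String) == "ontario") = true from by decide)]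
            simp only []
            rw [hlast2, if_neg g1, if_neg hb, hdrop, ← hqp, pv_toList_join]
        · by_cases hont : last = "ontario"
          · subst hont
            by_cases hc : p.toList.getLast? = some ','
            · have f1 : PySem.Chars.endswith n.toList [',', ' ', 'o', 'n'] = false := by
                rw [← Bool.not_eq_true, PySem.Chars.endswith_iff, hsufG2 ['o','n'] pv_nosp_on]
                exact fun h => absurd h.1 (by decide)
              have f2 : PySem.Chars.endswith n.toList [',', ' ', 'o', 'n', 't', 'a', 'r', 'i', 'o'] = true := by
                rw [PySem.Chars.endswith_iff]
                exact (hsufG2 ['o','n','t','a','r','i','o'] pv_nosp_ontario).mpr ⟨by decide, hc⟩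
              rw [show pvSuffixTrimA n pvSuffixesA
                  = PySem.Str.strip (PySem.Str.slice n none (some (-9))) from by
                simp [pvSuffixTrimA, pvSuffixesA, f1, f2]]
              refine String.toList_inj.mp ?_
              rw [PySem.Str.toList_strip, PySem.Str.toList_slice, PySem.Chars.slice_eq_listSlice,
                PySem.List.slice_to_neg_ofNat _ 9 (by omega)]
              have hnl2 : n.toList
                  = pvJ ((List.map String.toList r2 ++ [p.toList]) ++ [("ontario" : String).toList]) := by
                rw [hnl, hmap, hmap2]
              have hgood2 : pvGood ((List.map String.toList r2 ++ [p.toList]) ++ [("ontario" : String).toList]) := by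
                rw [← hmap2]; exact hgood'
              rw [hnl2, pv_comma_case _ _ _ 9 (by decide) hgood2 hc]
              have g1 : PySem.Str.endswith p "," = true := by
                rw [PySem.Str.endswith_eq, PySem.Chars.endswith_iff,
                  show ("," : String).toList = [','] from by decide]
                exact pv_singleton_suffix.mpr hc
              rw [pv_alt_step,
                if_pos (show (("ontario" : String) == "on" || ("ontario" : String) == "ontario") = true from by decide)]
              simp only []
              rw [hlast2, if_pos g1, hdrop]
              by_cases hPd : p.toList.dropLast = []
              · have hb : (PySem.Str.slice p none (some (-1)) == "") = true := by
                  rw [beq_iff_eq]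
                  exact String.toList_inj.mp (by rw [hprevl, hPd]; decide)
                rw [if_pos hPd, if_pos hb, List.append_nil, pv_toList_join]
                simp
              · have hb : ¬ ((PySem.Str.slice p none (some (-1)) == "") = true) := by
                  rw [beq_iff_eq]
                  intro hcontra
                  exact hPd (by rw [← hprevl, hcontra]; decide)
                rw [if_neg hPd, if_neg hb, pv_toList_join]
                simp [hprevl]
            · have f1 : PySem.Chars.endswith n.toList [',', ' ', 'o', 'n'] = false := by
                rw [← Bool.not_eq_true, PySem.Chars.endswith_iff, hsufG2 ['o','n'] pv_nosp_on]
                exact fun h => absurd h.1 (by decide)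
              have f2 : PySem.Chars.endswith n.toList [',', ' ', 'o', 'n', 't', 'a', 'r', 'i', 'o'] = false := by
                rw [← Bool.not_eq_true, PySem.Chars.endswith_iff,
                  hsufG2 ['o','n','t','a','r','i','o'] pv_nosp_ontario]
                exact fun h => hc h.2
              have f3 : PySem.Chars.endswith n.toList [' ', 'o', 'n'] = false := by
                rw [← Bool.not_eq_true, PySem.Chars.endswith_iff, hsufG1 ['o','n'] pv_nosp_on]
                decide
              have f4 : PySem.Chars.endswith n.toList [' ', 'o', 'n', 't', 'a', 'r', 'i', 'o'] = true := by
                rw [PySem.Chars.endswith_iff, hsufG1 ['o','n','t','a','r','i','o'] pv_nosp_ontario]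
                decide
              rw [show pvSuffixTrimA n pvSuffixesA
                  = PySem.Str.strip (PySem.Str.slice n none (some (-8))) from by
                simp [pvSuffixTrimA, pvSuffixesA, f1, f2, f3, f4]]
              refine String.toList_inj.mp ?_
              rw [PySem.Str.toList_strip, PySem.Str.toList_slice, PySem.Chars.slice_eq_listSlice,
                PySem.List.slice_to_neg_ofNat _ 8 (by omega)]
              have hnl2 : n.toList
                  = pvJ (List.map String.toList (q :: hs) ++ [("ontario" : String).toList]) := by
                rw [hnl, hmap]
              rw [hnl2, pv_space_case _ _ 8 (by decide) hRne hgood']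
              have g1 : ¬ (PySem.Str.endswith p "," = true) := by
                rw [PySem.Str.endswith_eq, PySem.Chars.endswith_iff,
                  show ("," : String).toList = [','] from by decide, pv_singleton_suffix]
                exact hc
              have hb : ¬ ((p == "") = true) := by
                rw [beq_iff_eq]
                intro hcontra
                exact hpne (by rw [hcontra]; decide)
              rw [pv_alt_step,
                if_pos (show (("ontario" : String) == "on" || ("ontario" : String) == "ontario") = true from by decide)]
              simp only []
              rw [hlast2, if_neg g1, if_neg hb, hdrop, ← hqp, pv_toList_join]
          · -- last is neither marker: nothing is removed on either side
            have hton : ¬ (['o','n'] = last.toList) := by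
              intro h
              exact hon (String.toList_inj.mp (by rw [← h]; decide)).symm
            have htont : ¬ (['o','n','t','a','r','i','o'] = last.toList) := by
              intro h
              exact hont (String.toList_inj.mp (by rw [← h]; decide)).symm
            have f1 : PySem.Chars.endswith n.toList [',', ' ', 'o', 'n'] = false := by
              rw [← Bool.not_eq_true, PySem.Chars.endswith_iff, hsufG2 ['o','n'] pv_nosp_on]
              exact fun h => hton h.1
            have f2 : PySem.Chars.endswith n.toList [',', ' ', 'o', 'n', 't', 'a', 'r', 'i', 'o'] = false := by
              rw [← Bool.not_eq_true, PySem.Chars.endswith_iff,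
                hsufG2 ['o','n','t','a','r','i','o'] pv_nosp_ontario]
              exact fun h => htont h.1
            have f3 : PySem.Chars.endswith n.toList [' ', 'o', 'n'] = false := by
              rw [← Bool.not_eq_true, PySem.Chars.endswith_iff, hsufG1 ['o','n'] pv_nosp_on]
              exact hton
            have f4 : PySem.Chars.endswith n.toList [' ', 'o', 'n', 't', 'a', 'r', 'i', 'o'] = false := by
              rw [← Bool.not_eq_true, PySem.Chars.endswith_iff,
                hsufG1 ['o','n','t','a','r','i','o'] pv_nosp_ontario]
              exact htont
            rw [show pvSuffixTrimA n pvSuffixesA = n from by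
              simp [pvSuffixTrimA, pvSuffixesA, f1, f2, f3, f4]]
            rw [pv_alt_step, if_neg (by simp [hon, hont])]
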